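-- pv_equiv track=rewrite | github.com/JinIleSon/Codingtest_practice | codingtest/현대오토에버/2026-04-05/secondQuestion.py | solution
-- ===== SOURCE A (Python) =====
-- def solution(enemy_power):
--     result = []
--
--     for k in range(1, len(enemy_power) + 1):
--         enemies = sorted(enemy_power)[:k]
--
--         positives = sorted([e for e in enemies if e >= 0])               # 작은 것부터
--         negatives = sorted([e for e in enemies if e < 0], reverse=True)  # 절댓값 작은 것부터
--         order = positives + negatives
--
--         start = 1    # 가능한 최솟값 1부터 시작, 조건 불만족 시 올림
--         gained = 0   # 지금까지 잡은 적들의 전투력 합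
--
--         for e in order:
--             current_power = start + gained  # 잡기 직전 내 전투력
--
--             # 조건1: 적을 이길 수 있냐?
--             if current_power <= e:
--                 start += e - current_power + 1
--
--             gained += e                     # 적 잡음
--             current_power = start + gained  # 잡고 난 후 내 전투력
--
--             # 조건2: 잡고 나서 살아있냐?
--             if current_power < 1:
--                 start += 1 - current_power
--
--         result.append(start)
--
--     return result
-- ===== SOURCE B (Python) =====
-- def solution(enemy_power):
--     result = []
--
--     for k in range(1, len(enemy_power) + 1):
--         enemies = sorted(enemy_power)[:k]
--
--         positives = sorted([e for e in enemies if e >= 0])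
--         negatives = sorted([e for e in enemies if e < 0], reverse=True)
--         order = positives + negatives
--
--         # prefix sums: pre[i] = sum of the first i enemies of `order`
--         pre = [0]
--         for e in order:
--             pre.append(pre[-1] + e)
--
--         # start must satisfy start + pre[i] > order[i]  (beat enemy i)
--         # and              start + pre[i+1] >= 1        (alive after enemy i)
--         beat = [e + 1 - p for e, p in zip(order, pre)]
--         alive = [1 - p for p in pre[1:]]
--         result.append(max([1] + beat + alive))
--
--     return result
-- ===== Notes on version B (the rewrite author's own statement) =====
-- stated objective: alternative
-- what changed: The stateful simulation with two conditional bumps of `start` is replaced by prefix sums over the kill order, two comprehensions listing the lower bounds start must satisfy (beat each enemy, stay alive after it), and a single max; correct because each bump in A is exactly start := max(start, bound).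
import Mathlib
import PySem

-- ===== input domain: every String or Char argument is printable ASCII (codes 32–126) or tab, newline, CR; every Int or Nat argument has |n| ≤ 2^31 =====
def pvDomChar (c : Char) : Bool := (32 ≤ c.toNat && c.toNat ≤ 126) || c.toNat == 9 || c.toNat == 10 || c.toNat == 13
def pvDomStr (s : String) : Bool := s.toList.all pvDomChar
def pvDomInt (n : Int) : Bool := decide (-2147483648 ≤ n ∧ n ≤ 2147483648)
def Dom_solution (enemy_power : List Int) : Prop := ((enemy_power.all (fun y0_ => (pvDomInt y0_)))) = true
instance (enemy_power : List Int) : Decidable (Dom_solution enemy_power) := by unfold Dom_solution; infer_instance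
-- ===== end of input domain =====

-- B replaces A's stateful simulation (two conditional bumps of `start`) by prefix sums,
-- an explicit list of the lower bounds `start` must satisfy, and a single max: an
-- alternative decomposition of the same per-prefix computation (same cost).

-- ===== PORT A =====

-- A's inner for-loop over `order`, state (start, gained)
def solAInner : List Int → Int → Int → Int
  | [], start, _ => start
  | e :: es, start, gained =>
      -- current_power = start + gained; conditional bump 1
      let start1 := if start + gained ≤ e then start + (e - (start + gained) + 1) else start
      let gained1 := gained + e
      -- conditional bump 2 after gaining e
      let start2 := if start1 + gained1 < 1 then start1 + (1 - (start1 + gained1)) else start1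
      solAInner es start2 gained1

def solution (enemy_power : List Int) : List Int :=
  (PySem.List.pyRange 1 (PySem.List.len enemy_power + 1) 1).foldl
    (fun result k =>
      let enemies := PySem.List.slice (PySem.List.sorted enemy_power (fun x => x) false) none (some k)
      let positives := PySem.List.sorted (enemies.filter (fun e => decide (0 ≤ e))) (fun x => x) false
      let negatives := PySem.List.sorted (enemies.filter (fun e => decide (e < 0))) (fun x => x) true
      let order := positives ++ negatives
      result ++ [solAInner order 1 0])
    []

-- ===== PORT B =====

-- Source B's `pre` loop: pre = [0]; for e in order: pre.append(pre[-1] + e)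
-- (pre[-1] never raises since pre is never empty; ported with pyGetD default 0)
def solBPre (order : List Int) : List Int :=
  order.foldl (fun pre e => pre ++ [PySem.List.pyGetD pre (-1) 0 + e]) [0]

def solution_alt (enemy_power : List Int) : List Int :=
  (PySem.List.pyRange 1 (PySem.List.len enemy_power + 1) 1).foldl
    (fun result k =>
      let enemies := PySem.List.slice (PySem.List.sorted enemy_power (fun x => x) false) none (some k)
      let positives := PySem.List.sorted (enemies.filter (fun e => decide (0 ≤ e))) (fun x => x) false
      let negatives := PySem.List.sorted (enemies.filter (fun e => decide (e < 0))) (fun x => x) true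
      let order := positives ++ negatives
      let pre := solBPre order
      let beat := (order.zip pre).map (fun ep => ep.1 + 1 - ep.2)
      let alive := (PySem.List.slice pre (some 1) none).map (fun p => 1 - p)
      -- max([1] + beat + alive): the list is nonempty, so max? is always some
      result ++ [(PySem.List.max? ([1] ++ beat ++ alive) (fun y => y)).getD 0])
    []

-- ===== PRECONDITION & SPEC =====
def Spec_solution (enemy_power : List Int) (out : List Int) : Prop := out = solution_alt enemy_power
instance (enemy_power : List Int) (out : List Int) : Decidable (Spec_solution enemy_power out) := by unfold Spec_solution; infer_instance

-- ===== CLAIM (what is proved, stated in full; the proofs are below) =====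
def Claim_equal_solution : Prop := ∀ (enemy_power : List Int), Dom_solution enemy_power → Spec_solution enemy_power (solution enemy_power)

-- ===== LEMMAS AND PROOFS =====

-- prefix sums of `order` starting from accumulated sum g (tail: without the leading g)
def presums (g : Int) : List Int → List Int
  | [] => []
  | e :: es => (g + e) :: presums (g + e) es

-- the "beat enemy i" bounds: e + 1 - (sum before e)
def beats (g : Int) : List Int → List Int
  | [] => []
  | e :: es => (e + 1 - g) :: beats (g + e) es

-- the "alive after enemy i" bounds: 1 - (sum up to and including e)
def alives (g : Int) : List Int → List Int
  | [] => []
  | e :: es => (1 - (g + e)) :: alives (g + e) es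

-- A's bounds in encounter order (beat e, then alive after e)
def interBounds (g : Int) : List Int → List Int
  | [] => []
  | e :: es => (e + 1 - g) :: (1 - (g + e)) :: interBounds (g + e) es

theorem solBPre_loop (es : List Int) : ∀ (acc : List Int) (g : Int),
    PySem.List.pyGetD acc (-1) 0 = g →
    es.foldl (fun pre e => pre ++ [PySem.List.pyGetD pre (-1) 0 + e]) acc = acc ++ presums g es := by
  induction es with
  | nil => intro acc g _; simp [presums]
  | cons e es ih =>
      intro acc g hg
      simp only [List.foldl_cons, hg]
      rw [ih (acc ++ [g + e]) (g + e) (PySem.List.pyGetD_neg_one_append_singleton acc (g + e) 0)]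
      simp [presums]

theorem solBPre_eq (order : List Int) : solBPre order = 0 :: presums 0 order := by
  unfold solBPre
  rw [solBPre_loop order [0] 0 (by decide)]
  rfl

theorem beat_eq (es : List Int) : ∀ g : Int,
    (es.zip (g :: presums g es)).map (fun ep => ep.1 + 1 - ep.2) = beats g es := by
  induction es with
  | nil => intro g; simp [beats]
  | cons e es ih => intro g; simp [presums, beats, ih (g + e)]

theorem alive_eq (es : List Int) : ∀ g : Int,
    (presums g es).map (fun p => 1 - p) = alives g es := by
  induction es with
  | nil => intro g; simp [presums, alives]
  | cons e es ih => intro g; simp [presums, alives, ih (g + e)]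

theorem solAInner_eq_foldl_max (es : List Int) : ∀ (s g : Int),
    solAInner es s g = (interBounds g es).foldl max s := by
  induction es with
  | nil => intro s g; simp [solAInner, interBounds]
  | cons e es ih =>
      intro s g
      simp only [solAInner, interBounds, List.foldl_cons]
      rw [ih]
      congr 1
      split_ifs <;> omega

theorem interBounds_perm (es : List Int) : ∀ g : Int,
    (interBounds g es).Perm (beats g es ++ alives g es) := by
  induction es with
  | nil => intro g; simp [interBounds, beats, alives]
  | cons e es ih =>
      intro g
      simp only [interBounds, beats, alives, List.cons_append]
      refine List.Perm.cons _ ?_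
      exact ((ih (g + e)).cons _).trans (List.perm_middle).symm

theorem max_lcomm : ∀ (a : Int) (b c : Int), max (max a b) c = max (max a c) b := by
  intro a b c; omega

theorem inner_eq (order : List Int) :
    (PySem.List.max? ([1] ++ (order.zip (solBPre order)).map (fun ep => ep.1 + 1 - ep.2)
        ++ (PySem.List.slice (solBPre order) (some 1) none).map (fun p => 1 - p)) (fun y => y)).getD 0
      = solAInner order 1 0 := by
  rw [solBPre_eq, PySem.List.slice_from_one]
  simp only [List.tail_cons, beat_eq order 0, alive_eq order 0, List.cons_append, List.append_assoc, PySem.List.max?_id_cons, Option.getD_some]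
  rw [solAInner_eq_foldl_max]
  haveI : RightCommutative (max : Int → Int → Int) := ⟨fun a b c => max_lcomm a b c⟩
  exact ((interBounds_perm order 0).foldl_eq 1).symm

-- ===== VERDICT (by name: the statement is the Claim_ definition above) =====
theorem solution_spec : Claim_equal_solution := by
  intro enemy_power _
  unfold Spec_solution solution solution_alt
  congr 1
  funext result k
  simp only [inner_eq]
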